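-- pv_equiv track=rewrite | github.com/Sumedha494/DSA-Questions | maximum_product_count.py | maxProductCount_optimized
-- ===== SOURCE A (Python) =====
-- def maxProductCount_optimized(arr):
--     """
--     Optimized approach
--     Find max product using Kadane's style, then count
--     Time: O(n) for max product + O(n²) for count
--     """
--     if not arr:
--         return 0
--
--     n = len(arr)
--
--     # Find max product using modified Kadane
--     max_product = arr[0]
--     max_ending = arr[0]
--     min_ending = arr[0]
--
--     for i in range(1, n):
--         if arr[i] < 0:
--             max_ending, min_ending = min_ending, max_ending
--
--         max_ending = max(arr[i], max_ending * arr[i])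
--         min_ending = min(arr[i], min_ending * arr[i])
--
--         max_product = max(max_product, max_ending)
--
--     # Count subarrays with max product
--     count = 0
--     for i in range(n):
--         product = 1
--         for j in range(i, n):
--             product *= arr[j]
--             if product == max_product:
--                 count += 1
--
--     return count, max_product
-- ===== SOURCE B (Python) =====
-- def maxProductCount_optimized(arr):
--     """One sweep over the products of subarrays ending at each index:
--     no Kadane pass and no nested index loops; the running best product and
--     its count are updated from each batch of ending-products."""
--     if not arr:
--         return 0, 0
--     best = arr[0]
--     cnt = 0
--     ending = []
--     for x in arr:
--         ending = [p * x for p in ending] + [x]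
--         m = max(ending)
--         if m > best:
--             best, cnt = m, ending.count(m)
--         elif m == best:
--             cnt += ending.count(m)
--     return cnt, best
-- ===== Notes on version B (the rewrite author's own statement) =====
-- stated objective: simpler
-- what changed: Replaces A's Kadane max-pass plus nested O(n^2) index-loop count by a single left-to-right sweep that maintains the products of subarrays ending at the current index and folds the running maximum and its count in from each batch.
-- outside the precondition, e.g. on maxProductCount_optimized([]): A returns 0, B returns (0, 0)
import Mathlib
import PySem

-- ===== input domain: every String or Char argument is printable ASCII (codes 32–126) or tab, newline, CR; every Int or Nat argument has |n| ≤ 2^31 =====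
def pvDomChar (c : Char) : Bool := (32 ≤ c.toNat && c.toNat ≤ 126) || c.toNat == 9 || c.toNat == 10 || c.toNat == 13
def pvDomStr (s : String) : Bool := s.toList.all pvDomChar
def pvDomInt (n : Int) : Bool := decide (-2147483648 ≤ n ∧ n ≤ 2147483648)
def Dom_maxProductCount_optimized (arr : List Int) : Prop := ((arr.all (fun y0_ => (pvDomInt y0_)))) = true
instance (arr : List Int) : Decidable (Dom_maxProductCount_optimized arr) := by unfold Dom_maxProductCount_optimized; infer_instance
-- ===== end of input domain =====

-- B replaces A's Kadane pass plus nested O(n^2) counting loops by one sweep over the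
-- products of subarrays ending at each index (objective: simpler); equivalence is on
-- non-empty inputs (Pre_), since on [] A returns a bare int 0, not an (int, int) pair.

-- ===== PORT A =====
-- helper naming the body of A's Kadane loop (state = (max_product, max_ending, min_ending))
def pvKStep (st : Int × Int × Int) (x : Int) : Int × Int × Int :=
  let me := if x < 0 then st.2.2 else st.2.1
  let mn := if x < 0 then st.2.1 else st.2.2
  let me' := max x (me * x)
  let mn' := min x (mn * x)
  (max st.1 me', me', mn')

-- helper naming the body of A's inner counting loop (state = (product, count))
def pvCStep (m : Int) (pc : Int × Int) (x : Int) : Int × Int :=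
  (pc.1 * x, if pc.1 * x = m then pc.2 + 1 else pc.2)

def maxProductCount_optimized (arr : List Int) : Int × Int :=
  match arr with
  | [] => (0, 0)   -- Python A returns the bare int 0 here; excluded by Pre_
  | a0 :: _ =>
    let n : Int := PySem.List.len arr
    let s := (PySem.List.pyRange 1 n).foldl
      (fun st i => pvKStep st (PySem.List.pyGetD arr i 0)) (a0, a0, a0)
    let count := (PySem.List.pyRange 0 n).foldl
      (fun (c : Int) i =>
        ((PySem.List.pyRange i n).foldl
          (fun pc j => pvCStep s.1 pc (PySem.List.pyGetD arr j 0)) (1, c)).2) 0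
    (count, s.1)

-- ===== PORT B =====
-- helper naming the body of B's sweep (state = (ending products, best, count))
def pvBStep (st : List Int × Int × Int) (x : Int) : List Int × Int × Int :=
  let ending := st.1.map (fun p => p * x) ++ [x]
  let m := (PySem.List.max? ending (fun y => y)).getD 0
  if m > st.2.1 then (ending, m, (PySem.List.count ending m : Int))
  else if m = st.2.1 then (ending, st.2.1, st.2.2 + (PySem.List.count ending m : Int))
  else (ending, st.2.1, st.2.2)

def maxProductCount_optimized_alt (arr : List Int) : Int × Int :=
  match arr with
  | [] => (0, 0)
  | a0 :: _ =>
    let st := arr.foldl pvBStep ([], a0, 0)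
    (st.2.2, st.2.1)

-- ===== PRECONDITION & SPEC =====
-- Pre_ excludes only the empty list, on which A returns the bare int 0 instead of an (int, int) pair.
def Pre_maxProductCount_optimized (arr : List Int) : Prop := arr ≠ []
instance (arr : List Int) : Decidable (Pre_maxProductCount_optimized arr) := by
  unfold Pre_maxProductCount_optimized; infer_instance

def pvWitness_maxProductCount_optimized : List Int := [2, -3, 0, 4]

def Spec_maxProductCount_optimized (arr : List Int) (out : Int × Int) : Prop := out = maxProductCount_optimized_alt arr
instance (arr : List Int) (out : Int × Int) : Decidable (Spec_maxProductCount_optimized arr out) := by unfold Spec_maxProductCount_optimized; infer_instance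

-- ===== CLAIM (what is proved, stated in full; the proofs are below) =====
def Claim_equal_maxProductCount_optimized : Prop := ∀ (arr : List Int), Dom_maxProductCount_optimized arr → Pre_maxProductCount_optimized arr → Spec_maxProductCount_optimized arr (maxProductCount_optimized arr)

-- ===== LEMMAS AND PROOFS =====

-- prefix products of a list (products of its non-empty initial segments, shortest first)
def pvPP : List Int → List Int
  | [] => []
  | x :: t => x :: (pvPP t).map (fun p => x * p)

-- one step of the "products of subarrays ending here" evolution
def pvEP (ep : List Int) (x : Int) : List Int := ep.map (fun p => p * x) ++ [x]

-- all subarray products of l, grouped by end index, starting from ending-products ep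
def pvF (ep : List Int) : List Int → List Int
  | [] => []
  | y :: t => pvEP ep y ++ pvF (pvEP ep y) t

-- the descendants of the seed products ep alone
def pvG (ep : List Int) : List Int → List Int
  | [] => []
  | y :: t => ep.map (fun p => p * y) ++ pvG (ep.map (fun p => p * y)) t

-- all subarray products of l, grouped by start index
def pvByStart : List Int → List Int
  | [] => []
  | x :: t => pvPP (x :: t) ++ pvByStart t

-- max / min of a list (0 on [], never used there)
def pvMx : List Int → Int
  | [] => 0
  | [a] => a
  | a :: b :: t => max a (pvMx (b :: t))

def pvMn : List Int → Int
  | [] => 0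
  | [a] => a
  | a :: b :: t => min a (pvMn (b :: t))

lemma pvMx_cons (a : Int) (l : List Int) (h : l ≠ []) : pvMx (a :: l) = max a (pvMx l) := by
  cases l with
  | nil => exact absurd rfl h
  | cons b t => rfl

lemma pvMn_cons (a : Int) (l : List Int) (h : l ≠ []) : pvMn (a :: l) = min a (pvMn l) := by
  cases l with
  | nil => exact absurd rfl h
  | cons b t => rfl

lemma pvMx_append (l1 l2 : List Int) (h1 : l1 ≠ []) (h2 : l2 ≠ []) :
    pvMx (l1 ++ l2) = max (pvMx l1) (pvMx l2) := by
  induction l1 with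
  | nil => exact absurd rfl h1
  | cons a t ih =>
    cases t with
    | nil => simpa [pvMx] using pvMx_cons a l2 h2
    | cons b u =>
      rw [List.cons_append, pvMx_cons a ((b :: u) ++ l2) (by simp), ih (by simp), pvMx,
        max_assoc]

lemma pvMn_append (l1 l2 : List Int) (h1 : l1 ≠ []) (h2 : l2 ≠ []) :
    pvMn (l1 ++ l2) = min (pvMn l1) (pvMn l2) := by
  induction l1 with
  | nil => exact absurd rfl h1
  | cons a t ih =>
    cases t with
    | nil => simpa [pvMn] using pvMn_cons a l2 h2
    | cons b u =>
      rw [List.cons_append, pvMn_cons a ((b :: u) ++ l2) (by simp), ih (by simp), pvMn,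
        min_assoc]

lemma pv_mul_max (a b x : Int) (hx : 0 ≤ x) : max a b * x = max (a * x) (b * x) := by
  rcases le_total a b with h | h
  · rw [max_eq_right h, max_eq_right (mul_le_mul_of_nonneg_right h hx)]
  · rw [max_eq_left h, max_eq_left (mul_le_mul_of_nonneg_right h hx)]

lemma pv_mul_min (a b x : Int) (hx : 0 ≤ x) : min a b * x = min (a * x) (b * x) := by
  rcases le_total a b with h | h
  · rw [min_eq_left h, min_eq_left (mul_le_mul_of_nonneg_right h hx)]
  · rw [min_eq_right h, min_eq_right (mul_le_mul_of_nonneg_right h hx)]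

lemma pv_mul_max_neg (a b x : Int) (hx : x ≤ 0) : max a b * x = min (a * x) (b * x) := by
  rcases le_total a b with h | h
  · rw [max_eq_right h, min_eq_right (mul_le_mul_of_nonpos_right h hx)]
  · rw [max_eq_left h, min_eq_left (mul_le_mul_of_nonpos_right h hx)]

lemma pv_mul_min_neg (a b x : Int) (hx : x ≤ 0) : min a b * x = max (a * x) (b * x) := by
  rcases le_total a b with h | h
  · rw [min_eq_left h, max_eq_left (mul_le_mul_of_nonpos_right h hx)]
  · rw [min_eq_right h, max_eq_right (mul_le_mul_of_nonpos_right h hx)]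

lemma pvMx_map_nonneg (l : List Int) (x : Int) (h : l ≠ []) (hx : 0 ≤ x) :
    pvMx (l.map (fun p => p * x)) = pvMx l * x := by
  induction l with
  | nil => exact absurd rfl h
  | cons a t ih =>
    cases t with
    | nil => simp [pvMx]
    | cons b u =>
      rw [List.map_cons, pvMx_cons _ _ (by simp), ih (by simp), pvMx, pv_mul_max _ _ _ hx]

lemma pvMn_map_nonneg (l : List Int) (x : Int) (h : l ≠ []) (hx : 0 ≤ x) :
    pvMn (l.map (fun p => p * x)) = pvMn l * x := by
  induction l with
  | nil => exact absurd rfl h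
  | cons a t ih =>
    cases t with
    | nil => simp [pvMn]
    | cons b u =>
      rw [List.map_cons, pvMn_cons _ _ (by simp), ih (by simp), pvMn, pv_mul_min _ _ _ hx]

lemma pvMx_map_neg (l : List Int) (x : Int) (h : l ≠ []) (hx : x ≤ 0) :
    pvMx (l.map (fun p => p * x)) = pvMn l * x := by
  induction l with
  | nil => exact absurd rfl h
  | cons a t ih =>
    cases t with
    | nil => simp [pvMx, pvMn]
    | cons b u =>
      rw [List.map_cons, pvMx_cons _ _ (by simp), ih (by simp), pvMn, pv_mul_min_neg _ _ _ hx]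

lemma pvMn_map_neg (l : List Int) (x : Int) (h : l ≠ []) (hx : x ≤ 0) :
    pvMn (l.map (fun p => p * x)) = pvMx l * x := by
  induction l with
  | nil => exact absurd rfl h
  | cons a t ih =>
    cases t with
    | nil => simp [pvMn, pvMx]
    | cons b u =>
      rw [List.map_cons, pvMn_cons _ _ (by simp), ih (by simp), pvMx, pv_mul_max_neg _ _ _ hx]

lemma pvEP_ne_nil (ep : List Int) (x : Int) : pvEP ep x ≠ [] := by
  simp [pvEP]

lemma pvMx_pvEP (ep : List Int) (x : Int) (h : ep ≠ []) :
    pvMx (pvEP ep x) = max x ((if x < 0 then pvMn ep else pvMx ep) * x) := by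
  rw [pvEP, pvMx_append _ _ (by simpa using h) (by simp)]
  by_cases hx : x < 0
  · rw [pvMx_map_neg _ _ h (le_of_lt hx)]
    simp [hx, pvMx, max_comm]
  · rw [pvMx_map_nonneg _ _ h (not_lt.mp hx)]
    simp [hx, pvMx, max_comm]

lemma pvMn_pvEP (ep : List Int) (x : Int) (h : ep ≠ []) :
    pvMn (pvEP ep x) = min x ((if x < 0 then pvMx ep else pvMn ep) * x) := by
  rw [pvEP, pvMn_append _ _ (by simpa using h) (by simp)]
  by_cases hx : x < 0
  · rw [pvMn_map_neg _ _ h (le_of_lt hx)]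
    simp [hx, pvMn, min_comm]
  · rw [pvMn_map_nonneg _ _ h (not_lt.mp hx)]
    simp [hx, pvMn, min_comm]

-- Kadane invariant: A's loop maintains (max of all products so far, max/min of ending products)
lemma pv_kadane_inv (u : List Int) : ∀ (ep all : List Int), ep ≠ [] → all ≠ [] →
    u.foldl pvKStep (pvMx all, pvMx ep, pvMn ep) =
      (pvMx (all ++ pvF ep u), pvMx (u.foldl pvEP ep), pvMn (u.foldl pvEP ep)) := by
  induction u with
  | nil => intro ep all _ _; simp [pvF]
  | cons x t ih =>
    intro ep all hep hall
    have hstep : pvKStep (pvMx all, pvMx ep, pvMn ep) x =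
        (max (pvMx all) (pvMx (pvEP ep x)), pvMx (pvEP ep x), pvMn (pvEP ep x)) := by
      rw [pvKStep, pvMx_pvEP _ _ hep, pvMn_pvEP _ _ hep]
    have hall' : all ++ pvEP ep x ≠ [] := by simp [pvEP]
    rw [List.foldl_cons, hstep, ← pvMx_append _ _ hall (pvEP_ne_nil ep x)]
    rw [ih (pvEP ep x) (all ++ pvEP ep x) (pvEP_ne_nil ep x) hall']
    rw [pvF, ← List.append_assoc, List.foldl_cons]


lemma pvMx_is_max (l : List Int) (y : Int) (hy : y ∈ l) : y ≤ pvMx l := by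
  induction l with
  | nil => cases hy
  | cons a t ih =>
    cases t with
    | nil => simp at hy; simp [pvMx, hy]
    | cons b u =>
      rw [pvMx_cons _ _ (by simp)]
      rcases List.mem_cons.mp hy with h | h
      · exact h ▸ le_max_left _ _
      · exact le_trans (ih h) (le_max_right _ _)

lemma pv_count_zero (l : List Int) (y : Int) (hy : pvMx l < y) : List.count y l = 0 := by
  rw [List.count_eq_zero]
  intro hmem
  exact absurd (pvMx_is_max l y hmem) (not_le.mpr hy)

lemma pvMx_eq_foldl (t : List Int) : ∀ (a : Int), pvMx (a :: t) = t.foldl max a := by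
  induction t with
  | nil => intro a; rfl
  | cons b u ih =>
    intro a
    rw [pvMx_cons _ _ (by simp), List.foldl_cons, ← ih (max a b)]
    cases u with
    | nil => simp [pvMx]
    | cons c v => rw [pvMx_cons b (c :: v) (by simp), pvMx_cons (max a b) (c :: v) (by simp), max_assoc]

lemma pv_maxD_eq (l : List Int) (h : l ≠ []) :
    (PySem.List.max? l (fun y => y)).getD 0 = pvMx l := by
  cases l with
  | nil => exact absurd rfl h
  | cons a t => rw [PySem.List.max?_id_cons, Option.getD_some, ← pvMx_eq_foldl]

-- invariant of B's sweep: (ending products, max of all products so far, its count)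
lemma pv_bloop (u : List Int) : ∀ (ep all : List Int), ep ≠ [] → all ≠ [] →
    u.foldl pvBStep (ep, pvMx all, (List.count (pvMx all) all : Int)) =
      (u.foldl pvEP ep, pvMx (all ++ pvF ep u),
        (List.count (pvMx (all ++ pvF ep u)) (all ++ pvF ep u) : Int)) := by
  induction u with
  | nil => intro ep all _ _; simp [pvF]
  | cons x t ih =>
    intro ep all hep hall
    have hne : pvEP ep x ≠ [] := pvEP_ne_nil ep x
    have hEeq : ep.map (fun p => p * x) ++ [x] = pvEP ep x := rfl
    have hstep : pvBStep (ep, pvMx all, (List.count (pvMx all) all : Int)) x =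
        (pvEP ep x, pvMx (all ++ pvEP ep x),
          (List.count (pvMx (all ++ pvEP ep x)) (all ++ pvEP ep x) : Int)) := by
      simp only [pvBStep, hEeq, pv_maxD_eq _ hne, PySem.List.count_eq]
      rw [pvMx_append _ _ hall hne]
      rcases lt_trichotomy (pvMx all) (pvMx (pvEP ep x)) with hlt | heq | hgt
      · rw [if_pos hlt, max_eq_right (le_of_lt hlt), List.count_append,
          pv_count_zero all _ hlt]
        simp
      · rw [if_neg (by omega), if_pos heq.symm, max_eq_left (le_of_eq heq.symm),
          List.count_append, ← heq]
        simp
      · rw [if_neg (by omega), if_neg (by omega), max_eq_left (le_of_lt hgt),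
          List.count_append, pv_count_zero (pvEP ep x) _ hgt]
        simp
    rw [List.foldl_cons, hstep, ih (pvEP ep x) (all ++ pvEP ep x) hne (by simp [pvEP])]
    rw [pvF, ← List.append_assoc, List.foldl_cons]

-- multiset bookkeeping: the by-end and by-start enumerations agree
lemma pvG_append (l : List Int) : ∀ (e1 e2 : List Int),
    (↑(pvG (e1 ++ e2) l) : Multiset Int) = ↑(pvG e1 l) + ↑(pvG e2 l) := by
  induction l with
  | nil => intro e1 e2; simp [pvG]
  | cons y t ih =>
    intro e1 e2
    simp only [pvG, List.map_append, ← Multiset.coe_add]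
    rw [ih]
    abel

lemma pvG_single (l : List Int) : ∀ (e : Int), pvG [e] l = (pvPP l).map (fun p => e * p) := by
  induction l with
  | nil => intro e; simp [pvG, pvPP]
  | cons y t ih =>
    intro e
    simp only [pvG, pvPP, List.map_cons, List.map_nil, List.map_map]
    rw [ih (e * y)]
    simp [mul_comm]

lemma pvF_split (l : List Int) : ∀ (ep : List Int),
    (↑(pvF ep l) : Multiset Int) = ↑(pvG ep l) + ↑(pvF [] l) := by
  induction l with
  | nil => intro ep; simp [pvF, pvG]
  | cons y t ih =>
    intro ep
    have h1 := ih (pvEP ep y)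
    have h2 := ih [y]
    simp only [pvEP] at h1
    simp only [pvF, pvG, pvEP, List.map_nil, List.nil_append, ← Multiset.coe_add]
    rw [h1, pvG_append t (ep.map (fun p => p * y)) [y], h2]
    abel

lemma pvF_perm_byStart (l : List Int) :
    (↑(pvF [] l) : Multiset Int) = ↑(pvByStart l) := by
  induction l with
  | nil => simp [pvF, pvByStart]
  | cons x t ih =>
    have h : pvF [] (x :: t) = [x] ++ pvF [x] t := by simp [pvF, pvEP]
    have hpp : pvPP (x :: t) = [x] ++ (pvPP t).map (fun p => x * p) := rfl
    rw [h, pvByStart, hpp]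
    simp only [← Multiset.coe_add]
    rw [pvF_split t [x], pvG_single t x, ih]
    abel

-- A's inner counting loop counts the max among scaled prefix products
lemma pv_inner (m : Int) (l : List Int) : ∀ (p0 c0 : Int),
    (l.foldl (pvCStep m) (p0, c0)).2 =
      c0 + (((pvPP l).map (fun p => p0 * p)).count m : Int) := by
  induction l with
  | nil => intro p0 c0; simp [pvPP]
  | cons x t ih =>
    intro p0 c0
    rw [List.foldl_cons]
    rw [show pvCStep m (p0, c0) x = (p0 * x, if p0 * x = m then c0 + 1 else c0) from rfl]
    rw [ih]
    have hm : ((pvPP t).map (fun p => x * p)).map (fun p => p0 * p)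
        = (pvPP t).map (fun p => p0 * x * p) := by
      rw [List.map_map]
      exact List.map_congr_left (fun p _ => by simp [Function.comp]; ring)
    simp only [pvPP, List.map_cons, hm, List.count_cons, beq_iff_eq]
    push_cast
    split_ifs with h1 <;> omega

-- A's outer counting loop sums the per-start counts
lemma pv_outer (arr : List Int) (m : Int) : ∀ (k : Nat) (a c0 : Int), 0 ≤ a →
    ((PySem.List.len arr) - a).toNat = k →
    (PySem.List.pyRange a (PySem.List.len arr)).foldl
      (fun (c : Int) i =>
        ((PySem.List.pyRange i (PySem.List.len arr)).foldl
          (fun pc j => pvCStep m pc (PySem.List.pyGetD arr j 0)) (1, c)).2) c0 =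
      c0 + ((pvByStart (arr.drop a.toNat)).count m : Int) := by
  intro k
  induction k with
  | zero =>
    intro a c0 ha h0
    have hL : PySem.List.len arr = (arr.length : Int) := by simp
    have hb : PySem.List.len arr ≤ a := by rw [hL] at h0 ⊢; omega
    have hd : arr.drop a.toNat = [] := by
      apply List.drop_eq_nil_of_le
      rw [hL] at hb; omega
    rw [PySem.List.pyRange_one_eq_nil hb, List.foldl_nil, hd]
    simp [pvByStart]
  | succ k ihk =>
    intro a c0 ha h0
    have hL : PySem.List.len arr = (arr.length : Int) := by simp
    have hlt : a < PySem.List.len arr := by rw [hL] at h0 ⊢; omega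
    have hlen : a.toNat < arr.length := by rw [hL] at hlt; omega
    rw [PySem.List.pyRange_one_cons hlt, List.foldl_cons,
      PySem.List.foldl_pyRange_pyGetD arr 0 (pvCStep m) (1, c0) ha, pv_inner]
    have hmap : ((pvPP (arr.drop a.toNat)).map (fun p => 1 * p)) = pvPP (arr.drop a.toNat) := by
      simp
    rw [hmap, ihk (a + 1) _ (by omega) (by rw [hL] at h0 ⊢; omega)]
    have h1 : (a + 1).toNat = a.toNat + 1 := by omega
    have hd : arr.drop a.toNat = arr[a.toNat] :: arr.drop (a.toNat + 1) :=
      List.drop_eq_getElem_cons hlen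
    rw [h1]
    conv_rhs => rw [hd]
    rw [show pvByStart (arr[a.toNat] :: arr.drop (a.toNat + 1)) =
      pvPP (arr[a.toNat] :: arr.drop (a.toNat + 1)) ++ pvByStart (arr.drop (a.toNat + 1)) from rfl]
    rw [← hd, List.count_append]
    push_cast
    ring

-- ===== VERDICT (by name: the statement is the Claim_ definition above) =====
-- assembling the two sides
lemma pv_main (arr : List Int) (h : arr ≠ []) :
    maxProductCount_optimized arr = maxProductCount_optimized_alt arr := by
  cases arr with
  | nil => exact absurd rfl h
  | cons a0 rest =>
    simp only [maxProductCount_optimized, maxProductCount_optimized_alt]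
    have hF0 : pvF [] (a0 :: rest) = a0 :: pvF [a0] rest := by simp [pvF, pvEP]
    -- Kadane loop = max over all subarray products
    have hK : (PySem.List.pyRange 1 (PySem.List.len (a0 :: rest))).foldl
        (fun st i => pvKStep st (PySem.List.pyGetD (a0 :: rest) i 0)) (a0, a0, a0) =
        rest.foldl pvKStep (a0, a0, a0) := by
      rw [PySem.List.foldl_pyRange_pyGetD (a0 :: rest) 0 pvKStep (a0, a0, a0) (by omega)]
      rfl
    have hkad := pv_kadane_inv rest [a0] [a0] (by simp) (by simp)
    have hMx : pvMx [a0] = a0 := rfl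
    have hMn : pvMn [a0] = a0 := rfl
    rw [hMx, hMn] at hkad
    have hM1 : (rest.foldl pvKStep (a0, a0, a0)).1 = pvMx (pvF [] (a0 :: rest)) := by
      rw [hkad, hF0]
      rfl
    -- B's sweep: first iteration seeds the invariant, pv_bloop carries it
    have hfirst : pvBStep ([], a0, 0) a0 = ([a0], a0, 1) := by
      have h1 : (List.map (fun p => p * a0) [] ++ [a0] : List Int) = [a0] := rfl
      simp only [pvBStep, h1, pv_maxD_eq [a0] (by simp), PySem.List.count_eq]
      simp [pvMx]
    have hB : (a0 :: rest).foldl pvBStep ([], a0, 0) =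
        (rest.foldl pvEP [a0], pvMx (pvF [] (a0 :: rest)),
          (List.count (pvMx (pvF [] (a0 :: rest))) (pvF [] (a0 :: rest)) : Int)) := by
      rw [List.foldl_cons, hfirst]
      have := pv_bloop rest [a0] [a0] (by simp) (by simp)
      simp only [pvMx, List.count_singleton, beq_self_eq_true, if_true, Nat.cast_one] at this
      rw [this, hF0]
      rfl
    -- counts agree (the two enumerations are a permutation of each other)
    have hcnt : ∀ M : Int, (pvByStart (a0 :: rest)).count M = (pvF [] (a0 :: rest)).count M := by
      intro M
      rw [← Multiset.coe_count, ← Multiset.coe_count, pvF_perm_byStart]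
    have hout := pv_outer (a0 :: rest) (pvMx (pvF [] (a0 :: rest)))
      ((a0 :: rest).length) 0 0 (by omega) (by simp)
    simp only [Int.zero_add] at hout
    rw [hK, hM1, hout, hB]
    rw [show Int.toNat 0 = 0 from rfl, List.drop_zero, hcnt]

theorem maxProductCount_optimized_spec : Claim_equal_maxProductCount_optimized := by
  intro arr _hdom hpre
  unfold Spec_maxProductCount_optimized
  exact pv_main arr hpre
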